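-- pv_equiv track=rewrite | github.com/lulongtw/practice | python/ltc_code/self/CCC '04 S2 - TopYodeller.py | paimin
-- ===== SOURCE A (Python) =====
-- def paimin(wrnk,listt) :
--     lt = listt.copy()
--     for a in range(len(lt)) :
--         lt[a] = [lt[a],a]
--     lt.sort(reverse=True)
--     for a in range(len(lt)) :
--         if a == 0 :
--             mintz = 1
--             lt[a].append(mintz)
--         elif a > 0 and lt[a][0] != lt[a-1][0] :
--             mintz = a+1
--             lt[a].append(mintz)
--         elif lt[a][0] != lt[a-1][0] :
--             lt[a].append(mintz)
--         if wrnk[lt[a][1]] < mintz :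
--             wrnk[lt[a][1]] = mintz
--     return wrnk
-- ===== SOURCE B (Python) =====
-- def paimin(wrnk, listt):
--     # Sort the values once (descending); a value's competition rank is 1 + the index of its
--     # first occurrence there, recorded in a table; then one positional pass updates wrnk
--     # (same in-place mutation of wrnk as A).
--     rank = {}
--     for i, v in enumerate(sorted(listt, reverse=True)):
--         if v not in rank:
--             rank[v] = i + 1
--     for i, v in enumerate(listt):
--         r = rank[v]
--         if wrnk[i] < r:
--             wrnk[i] = r
--     return wrnk
-- ===== Notes on version B (the rewrite author's own statement) =====
-- stated objective: alternative
-- what changed: Replaces A's stateful walk over sorted [value,index] pairs (position counter, previous-value comparison, carried mintz) by sorting the plain values once, building a value-to-competition-rank table at first occurrences, and a separate positional pass over listt that updates wrnk.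
import Mathlib
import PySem

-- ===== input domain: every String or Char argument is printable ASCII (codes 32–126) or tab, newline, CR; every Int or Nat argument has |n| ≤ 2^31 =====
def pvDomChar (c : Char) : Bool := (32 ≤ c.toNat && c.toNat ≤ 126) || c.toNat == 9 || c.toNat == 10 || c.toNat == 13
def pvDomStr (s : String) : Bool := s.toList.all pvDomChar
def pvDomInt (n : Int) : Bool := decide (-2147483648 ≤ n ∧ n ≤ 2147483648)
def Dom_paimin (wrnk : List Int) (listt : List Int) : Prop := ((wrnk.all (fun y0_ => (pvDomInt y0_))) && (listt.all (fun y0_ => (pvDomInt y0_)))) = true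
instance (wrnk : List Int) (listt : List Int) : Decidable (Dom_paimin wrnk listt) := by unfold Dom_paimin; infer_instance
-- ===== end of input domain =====

-- B replaces A's sort-and-walk (with its index bookkeeping and carried `mintz`) by a single
-- positional pass computing each entry's competition rank directly as 1 + number of strictly
-- greater values (objective: simpler). Both A and B mutate `wrnk` in place in Python; the
-- equivalence proved here is about the returned list (which IS that mutated `wrnk` in both).

-- ===== PORT A =====
-- The loop 'for a in range(len(lt))': `a` is the counter, `prev` holds lt[a-1][0] (none when
-- a = 0), `mintz` the carried rank. A's third branch 'elif lt[a][0] != lt[a-1][0]: lt[a].append(mintz)'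
-- only appends to the (write-only) third slot of lt[a], as do the other appends; the appended
-- slots are never read, so the pairs (value, index) carry the whole state.
def paiminGo : List (Int × Int) → Int → Option Int → Int → List Int → List Int
  | [], _, _, _, wrnk => wrnk
  | (v, idx) :: rest, a, prev, mintz, wrnk =>
      let mintz' : Int := if a = 0 then 1 else if v ≠ prev.getD 0 then a + 1 else mintz
      let wrnk' := if PySem.List.pyGetD wrnk idx 0 < mintz' then PySem.List.pySetD wrnk idx mintz' else wrnk
      paiminGo rest (a + 1) (some v) mintz' wrnk'

def paimin (wrnk : List Int) (listt : List Int) : List Int :=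
  -- lt = [[listt[a], a] for a in range(len(listt))]; lt.sort(reverse=True) orders the pairs by
  -- Python's lexicographic comparison of lists, descending: key = toLex, reverse = true.
  let lt := (PySem.List.enumerate listt).map (fun p => (p.2, p.1))
  let lts := PySem.List.sorted lt (fun p => toLex p) true
  paiminGo lts 0 none 0 wrnk

-- ===== PORT B =====
def paimin_alt (wrnk : List Int) (listt : List Int) : List Int :=
  -- rank = {}; for i, v in enumerate(sorted(listt, reverse=True)): if v not in rank: rank[v] = i + 1
  let rank : PySem.Dict Int Int :=
    (PySem.List.enumerate (PySem.List.sorted listt (fun x => x) true)).foldl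
      (fun d p => if d.contains p.2 then d else d.insert p.2 (p.1 + 1))
      (PySem.Dict.empty : PySem.Dict Int Int)
  -- r = rank[v]: every v of listt is a key of rank, so the KeyError branch of Python's
  -- rank[v] is unreachable; ported as get? with a (never used) default 0.
  (PySem.List.enumerate listt).foldl
    (fun w p =>
      let r : Int := (rank.get? p.2).getD 0
      if PySem.List.pyGetD w p.1 0 < r then PySem.List.pySetD w p.1 r else w)
    wrnk

-- ===== PRECONDITION & SPEC =====
-- Pre_ excludes exactly the inputs where the Python A raises IndexError (reading wrnk[i] for an
-- index i of listt beyond wrnk); B raises there too.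
def Pre_paimin (wrnk : List Int) (listt : List Int) : Prop := listt.length ≤ wrnk.length
instance (wrnk : List Int) (listt : List Int) : Decidable (Pre_paimin wrnk listt) := by unfold Pre_paimin; infer_instance
def pvWitness_paimin : List Int × List Int := ([0, 0, 0, 0, 0], [5, 3, 5, 2, 3])

def Spec_paimin (wrnk : List Int) (listt : List Int) (out : List Int) : Prop := out = paimin_alt wrnk listt
instance (wrnk : List Int) (listt : List Int) (out : List Int) : Decidable (Spec_paimin wrnk listt out) := by unfold Spec_paimin; infer_instance

-- ===== CLAIM (what is proved, stated in full; the proofs are below) =====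
def Claim_equal_paimin : Prop := ∀ (wrnk : List Int) (listt : List Int), Dom_paimin wrnk listt → Pre_paimin wrnk listt → Spec_paimin wrnk listt (paimin wrnk listt)

-- ===== LEMMAS AND PROOFS =====

-- the competition rank of value v in listt
def rnk (listt : List Int) (v : Int) : Int := 1 + ((listt.filter (fun x => decide (v < x))).length : Int)

-- the common update step: p = (value, index)
def updStep (listt : List Int) (w : List Int) (p : Int × Int) : List Int :=
  if PySem.List.pyGetD w p.2 0 < rnk listt p.1 then PySem.List.pySetD w p.2 (rnk listt p.1) else w

lemma rnk_prefix (listt ds rs : List Int) (v : Int)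
    (hsort : (ds ++ v :: rs).Pairwise (fun x y => y ≤ x))
    (hperm : (ds ++ v :: rs).Perm listt)
    (hgt : ∀ x ∈ ds, v < x) :
    rnk listt v = (ds.length : Int) + 1 := by
  have hfl : (listt.filter (fun x => decide (v < x))).length
      = ((ds ++ v :: rs).filter (fun x => decide (v < x))).length :=
    (hperm.filter _).length_eq.symm
  have hrs : ∀ y ∈ rs, y ≤ v := (List.pairwise_cons.mp (List.pairwise_append.mp hsort).2.1).1
  have htail : (v :: rs).filter (fun x => decide (v < x)) = [] := by
    rw [List.filter_eq_nil_iff]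
    intro y hy
    rcases List.mem_cons.mp hy with h | h
    · simp [h]
    · simpa using not_lt.mpr (hrs y h)
  unfold rnk
  rw [hfl, List.filter_append, List.length_append, htail,
    List.filter_eq_self.mpr (fun x hx => by simpa using hgt x hx)]
  simp
  omega

lemma length_foldl_upd (listt : List Int) (ps : List (Int × Int)) (w : List Int) :
    (ps.foldl (updStep listt) w).length = w.length := by
  induction ps generalizing w with
  | nil => rfl
  | cons p rest ih =>
      simp only [List.foldl_cons, ih]
      unfold updStep
      split <;> simp [PySem.List.length_pySetD]

lemma getD_foldl_upd (listt : List Int) (ps : List (Int × Int)) (w : List Int)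
    (hps : ∀ p ∈ ps, ∃ k : Nat, k < listt.length ∧ p = (listt.getD k 0, (k : Int)))
    (hnd : (ps.map (·.2)).Nodup) (j : Nat) (hj : j < w.length) :
    (ps.foldl (updStep listt) w).getD j 0 =
      if ((j : Int)) ∈ ps.map (·.2) then max (w.getD j 0) (rnk listt (listt.getD j 0))
      else w.getD j 0 := by
  induction ps generalizing w with
  | nil => simp
  | cons p rest ih =>
      obtain ⟨k, hk, hpk⟩ := hps p (List.mem_cons_self ..)
      subst hpk
      simp only [List.foldl_cons]
      have hstep : updStep listt w (listt.getD k 0, (k : Int)) =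
          if w.getD k 0 < rnk listt (listt.getD k 0)
          then w.set k (rnk listt (listt.getD k 0)) else w := by
        unfold updStep
        rw [PySem.List.pyGetD_natCast, PySem.List.pySetD_natCast]
      have hlen : (updStep listt w (listt.getD k 0, (k : Int))).length = w.length := by
        rw [hstep]; split <;> simp
      have hps' : ∀ q ∈ rest, ∃ m : Nat, m < listt.length ∧ q = (listt.getD m 0, (m : Int)) :=
        fun q hq => hps q (List.mem_cons_of_mem _ hq)
      have hnd0 : ((k : Int)) ∉ rest.map (·.2) ∧ (rest.map (·.2)).Nodup := by
        rw [List.map_cons] at hnd; exact List.nodup_cons.mp hnd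
      have hj' : j < (updStep listt w (listt.getD k 0, (k : Int))).length := by
        rw [hlen]; exact hj
      rw [ih _ hps' hnd0.2 hj']
      by_cases hjk : j = k
      · subst hjk
        have hkn : ((j : Int)) ∉ rest.map (·.2) := hnd0.1
        have hhead : ((j : Int)) ∈ (((listt.getD j 0, (j : Int))) :: rest).map (·.2) := by simp
        rw [if_neg hkn, if_pos hhead, hstep]
        by_cases hlt : w.getD j 0 < rnk listt (listt.getD j 0)
        · rw [if_pos hlt]
          have hset : (w.set j (rnk listt (listt.getD j 0))).getD j 0 = rnk listt (listt.getD j 0) := by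
            rw [List.getD_eq_getElem _ _ (by simpa using hj)]
            simp
          rw [hset]
          exact (max_eq_right (le_of_lt hlt)).symm
        · rw [if_neg hlt]
          exact (max_eq_left (by omega)).symm
      · have hji : ((j : Int)) ≠ ((k : Int)) := by exact_mod_cast hjk
        have hmem : (((j : Int)) ∈ (((listt.getD k 0, (k : Int))) :: rest).map (·.2)) ↔
            ((j : Int)) ∈ rest.map (·.2) := by
          simp only [List.map_cons, List.mem_cons]
          exact ⟨fun h => h.elim (fun h' => absurd h' hji) id, Or.inr⟩
        have hwj : (updStep listt w (listt.getD k 0, (k : Int))).getD j 0 = w.getD j 0 := by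
          rw [hstep]; split
          · rw [List.getD_eq_getElem?_getD, List.getD_eq_getElem?_getD,
              List.getElem?_set_ne (fun h => hjk h.symm)]
            rw [← List.getD_eq_getElem?_getD]
          · rfl
        rw [hwj]
        by_cases hr : ((j : Int)) ∈ rest.map (·.2)
        · rw [if_pos hr, if_pos (hmem.mpr hr)]
        · rw [if_neg hr, if_neg (fun h => hr (hmem.mp h))]

lemma goA_eq (listt : List Int) (lt : List (Int × Int)) :
    ∀ (done : List (Int × Int)) (prev : Option Int) (mintz : Int) (w : List Int),
    ((done ++ lt).map (·.1)).Pairwise (fun x y => y ≤ x) →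
    ((done ++ lt).map (·.1)).Perm listt →
    (match prev with
     | none => done = []
     | some p => mintz = rnk listt p ∧ ∃ d' q, done = d' ++ [q] ∧ q.1 = p) →
    paiminGo lt (done.length : Int) prev mintz w = lt.foldl (updStep listt) w := by
  induction lt with
  | nil => intro done prev mintz w _ _ _; rfl
  | cons hd rest ih =>
      obtain ⟨v, i⟩ := hd
      intro done prev mintz w hsort hperm hprev
      rw [List.map_append, List.map_cons] at hsort hperm
      obtain ⟨hd1, hc1, hcross⟩ := List.pairwise_append.mp hsort
      -- the computed new mintz equals rnk listt v
      have hm : (if (done.length : Int) = 0 then (1 : Int)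
          else if v ≠ prev.getD 0 then (done.length : Int) + 1 else mintz) = rnk listt v := by
        cases prev with
        | none =>
            have hd0 : done = [] := hprev
            subst hd0
            simp only [List.length_nil, Int.natCast_zero, if_pos]
            rw [rnk_prefix listt [] (rest.map (·.1)) v (by simpa using hsort)
              (by simpa using hperm) (by simp)]
            simp
        | some p =>
            obtain ⟨hm0, d', q, hdone, hq⟩ := hprev
            have hne0 : ¬ ((done.length : Int) = 0) := by
              intro h; subst hdone; simp at h; omega
            rw [if_neg hne0]
            by_cases hv : v = p
            · rw [if_neg (by simp [hv])]
              rw [hm0, hv]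
            · rw [if_pos (by simp [hv])]
              -- every value in done is > v
              have hpmem : p ∈ done.map (·.1) := by
                subst hdone; rw [← hq]; simp
              have hvp : v ≤ p := hcross p hpmem v (List.mem_cons_self ..)
              have hvplt : v < p := lt_of_le_of_ne hvp hv
              have hdgt : ∀ x ∈ done.map (·.1), v < x := by
                intro x hx
                subst hdone
                rw [List.map_append] at hx hd1
                rcases List.mem_append.mp hx with h | h
                · obtain ⟨_, _, hcr⟩ := List.pairwise_append.mp hd1
                  have : q.1 ≤ x := hcr x h q.1 (by simp)
                  omega
                · have hxp : x = p := by rw [← hq]; simpa using h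
                  omega
              rw [rnk_prefix listt (done.map (·.1)) (rest.map (·.1)) v
                (by simpa using hsort) (by simpa using hperm) hdgt]
              simp
      rw [show paiminGo ((v, i) :: rest) (done.length : Int) prev mintz w =
          paiminGo rest ((done.length : Int) + 1) (some v)
            (if (done.length : Int) = 0 then (1 : Int)
              else if v ≠ prev.getD 0 then (done.length : Int) + 1 else mintz)
            (if PySem.List.pyGetD w i 0 <
                  (if (done.length : Int) = 0 then (1 : Int)
                    else if v ≠ prev.getD 0 then (done.length : Int) + 1 else mintz)
              then PySem.List.pySetD w i
                  (if (done.length : Int) = 0 then (1 : Int)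
                    else if v ≠ prev.getD 0 then (done.length : Int) + 1 else mintz)
              else w) from rfl]
      rw [hm]
      have hw' : (if PySem.List.pyGetD w i 0 < rnk listt v
          then PySem.List.pySetD w i (rnk listt v) else w) = updStep listt w (v, i) := rfl
      rw [hw']
      have hlen1 : ((done ++ [(v, i)]).length : Int) = (done.length : Int) + 1 := by simp
      rw [← hlen1]
      rw [List.foldl_cons]
      exact ih (done ++ [(v, i)]) (some v) (rnk listt v) (updStep listt w (v, i))
        (by rw [List.append_assoc]; simpa using hsort)
        (by rw [List.append_assoc]; simpa using hperm)
        ⟨rfl, done, (v, i), rfl, rfl⟩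

lemma A_eq_fold (wrnk listt : List Int) :
    paimin wrnk listt =
      (PySem.List.sorted ((PySem.List.enumerate listt).map (fun p => (p.2, p.1)))
          (fun p => toLex p) true).foldl (updStep listt) wrnk := by
  have h1 : ((PySem.List.sorted ((PySem.List.enumerate listt).map (fun p => (p.2, p.1)))
      (fun p => toLex p) true).map (·.1)).Pairwise (fun x y => y ≤ x) := by
    rw [List.pairwise_map]
    refine (PySem.List.sorted_pairwise_rev _ _).imp ?_
    intro a b hab
    rcases Prod.Lex.le_iff.mp hab with h | h
    · exact le_of_lt h
    · exact le_of_eq h.1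
  have h2 : ((PySem.List.sorted ((PySem.List.enumerate listt).map (fun p => (p.2, p.1)))
      (fun p => toLex p) true).map (·.1)).Perm listt := by
    have hp := (PySem.List.sorted_perm ((PySem.List.enumerate listt).map (fun p => (p.2, p.1)))
      (fun p => toLex p) true).map (·.1)
    refine hp.trans ?_
    rw [List.map_map,
      show ((fun x : Int × Int => x.1) ∘ fun p : Int × Int => (p.2, p.1)) = (fun x : Int × Int => x.2) from rfl,
      PySem.List.map_snd_enumerate]
  have := goA_eq listt
    (PySem.List.sorted ((PySem.List.enumerate listt).map (fun p => (p.2, p.1)))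
      (fun p => toLex p) true) [] none 0 wrnk (by simpa using h1) (by simpa using h2) rfl
  simpa [paimin] using this

lemma dict_go (listt s : List Int)
    (hs_sort : s.Pairwise (fun x y => y ≤ x)) (hs_perm : s.Perm listt) :
    ∀ (rsv dsv : List Int) (d : PySem.Dict Int Int),
    dsv ++ rsv = s →
    (∀ u : Int, u ∈ dsv → d.get? u = some (rnk listt u)) →
    (∀ u : Int, u ∉ dsv → d.get? u = none) →
    ∀ v ∈ s,
      ((PySem.List.enumerate rsv (dsv.length : Int)).foldl
          (fun d p => if d.contains p.2 then d else d.insert p.2 (p.1 + 1)) d).get? v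
        = some (rnk listt v) := by
  intro rsv
  induction rsv with
  | nil =>
      intro dsv d hsplit hin hout v hv
      rw [PySem.List.enumerate_nil, List.foldl_nil]
      apply hin
      rw [← hsplit] at hv
      simpa using hv
  | cons u rsv ih =>
      intro dsv d hsplit hin hout v hv
      rw [PySem.List.enumerate_cons, List.foldl_cons]
      have hlen : ((dsv ++ [u]).length : Int) = (dsv.length : Int) + 1 := by simp
      have hsplit' : (dsv ++ [u]) ++ rsv = s := by rw [List.append_assoc]; simpa using hsplit
      by_cases hu : u ∈ dsv
      · have hc : d.contains u = true := by
          rw [PySem.Dict.contains_eq_isSome_get?, hin u hu]; rfl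
        rw [if_pos hc]
        have hin' : ∀ w : Int, w ∈ dsv ++ [u] → d.get? w = some (rnk listt w) := by
          intro w hw
          rcases List.mem_append.mp hw with h | h
          · exact hin w h
          · exact hin w ((List.mem_singleton.mp h) ▸ hu)
        have hout' : ∀ w : Int, w ∉ dsv ++ [u] → d.get? w = none := by
          intro w hw
          exact hout w (fun h => hw (List.mem_append.mpr (Or.inl h)))
        have := ih (dsv ++ [u]) d hsplit' hin' hout' v hv
        rw [hlen] at this
        exact this
      · have hc : d.contains u = false := by
          rw [PySem.Dict.contains_eq_isSome_get?, hout u hu]; rfl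
        rw [if_neg (by simp [hc])]
        have hrnku : rnk listt u = (dsv.length : Int) + 1 := by
          apply rnk_prefix listt dsv rsv u (by rw [hsplit]; exact hs_sort)
            (by rw [hsplit]; exact hs_perm)
          intro x hx
          have hcross := (List.pairwise_append.mp
            (show (dsv ++ u :: rsv).Pairwise (fun x y => y ≤ x) by rw [hsplit]; exact hs_sort)).2.2
          have hux : u ≤ x := hcross x hx u (List.mem_cons_self ..)
          have hne : x ≠ u := fun h => hu (h ▸ hx)
          omega
        have hin' : ∀ w : Int, w ∈ dsv ++ [u] →
            (d.insert u ((dsv.length : Int) + 1)).get? w = some (rnk listt w) := by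
          intro w hw
          rcases List.mem_append.mp hw with h | h
          · have hne : w ≠ u := fun he => hu (he ▸ h)
            rw [PySem.Dict.get?_insert_of_ne d _ hne]
            exact hin w h
          · rw [List.mem_singleton.mp h, PySem.Dict.get?_insert_self, hrnku]
        have hout' : ∀ w : Int, w ∉ dsv ++ [u] →
            (d.insert u ((dsv.length : Int) + 1)).get? w = none := by
          intro w hw
          have hne : w ≠ u := fun he => hw (List.mem_append.mpr (Or.inr (by simp [he])))
          rw [PySem.Dict.get?_insert_of_ne d _ hne]
          exact hout w (fun h => hw (List.mem_append.mpr (Or.inl h)))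
        have := ih (dsv ++ [u]) (d.insert u ((dsv.length : Int) + 1)) hsplit' hin' hout' v hv
        rw [hlen] at this
        exact this

lemma rank_correct (listt : List Int) (v : Int) (hv : v ∈ listt) :
    ((PySem.List.enumerate (PySem.List.sorted listt (fun x => x) true)).foldl
        (fun d p => if d.contains p.2 then d else d.insert p.2 (p.1 + 1))
        (PySem.Dict.empty : PySem.Dict Int Int)).get? v = some (rnk listt v) := by
  have hs_sort : (PySem.List.sorted listt (fun x => x) true).Pairwise (fun x y => y ≤ x) :=
    PySem.List.sorted_pairwise_rev listt _
  have hs_perm : (PySem.List.sorted listt (fun x => x) true).Perm listt :=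
    PySem.List.sorted_perm listt _ true
  have hv' : v ∈ PySem.List.sorted listt (fun x => x) true := hs_perm.mem_iff.mpr hv
  have h := dict_go listt _ hs_sort hs_perm (PySem.List.sorted listt (fun x => x) true) []
    PySem.Dict.empty rfl (fun u hu => absurd hu (by simp)) (fun u _ => rfl) v hv'
  simpa using h

lemma B_eq_fold (wrnk listt : List Int) :
    paimin_alt wrnk listt =
      ((PySem.List.enumerate listt).map (fun p => (p.2, p.1))).foldl (updStep listt) wrnk := by
  unfold paimin_alt
  rw [List.foldl_map]
  apply PySem.List.foldl_congr_mem
  intro w p hp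
  have hv : p.2 ∈ listt := by
    rw [PySem.List.mem_enumerate_iff] at hp
    obtain ⟨k, hk, rfl⟩ := hp
    exact List.getElem_mem hk
  simp only [rank_correct listt p.2 hv, Option.getD_some]
  rfl

-- ===== VERDICT (by name: the statement is the Claim_ definition above) =====
theorem paimin_spec : Claim_equal_paimin := by
  intro wrnk listt _ _
  unfold Spec_paimin
  rw [A_eq_fold, B_eq_fold]
  set lt0 := (PySem.List.enumerate listt).map (fun p => (p.2, p.1)) with hlt0
  set S := PySem.List.sorted lt0 (fun p => toLex p) true with hS
  have hperm2 : S.Perm lt0 := PySem.List.sorted_perm lt0 _ true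
  have hps0 : ∀ p ∈ lt0, ∃ k : Nat, k < listt.length ∧ p = (listt.getD k 0, (k : Int)) := by
    intro p hp
    rw [hlt0, List.mem_map] at hp
    obtain ⟨q, hq, rfl⟩ := hp
    rw [PySem.List.mem_enumerate_iff] at hq
    obtain ⟨k, h, rfl⟩ := hq
    exact ⟨k, h, by rw [List.getD_eq_getElem _ _ h]; simp⟩
  have hpsS : ∀ p ∈ S, ∃ k : Nat, k < listt.length ∧ p = (listt.getD k 0, (k : Int)) :=
    fun p hp => hps0 p ((PySem.List.mem_sorted lt0 _ true p).mp hp)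
  have hnd0 : (lt0.map (·.2)).Nodup := by
    have hm : lt0.map (·.2) = (PySem.List.enumerate listt).map (·.1) := by
      rw [hlt0, List.map_map]; rfl
    rw [hm, PySem.List.map_fst_enumerate]
    exact PySem.List.nodup_pyRange_one _ _
  have hndS : (S.map (·.2)).Nodup := ((hperm2.map (·.2)).nodup_iff).mpr hnd0
  have hmemiff : ∀ z : Int, (z ∈ S.map (·.2)) ↔ (z ∈ lt0.map (·.2)) :=
    fun z => (hperm2.map (·.2)).mem_iff
  have hlA : (S.foldl (updStep listt) wrnk).length = wrnk.length := length_foldl_upd _ _ _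
  have hlB : (lt0.foldl (updStep listt) wrnk).length = wrnk.length := length_foldl_upd _ _ _
  apply List.ext_getElem (by rw [hlA, hlB])
  intro j hjA hjB
  have hj : j < wrnk.length := by rw [hlA] at hjA; exact hjA
  rw [← List.getD_eq_getElem _ 0 hjA, ← List.getD_eq_getElem _ 0 hjB,
    getD_foldl_upd listt S wrnk hpsS hndS j hj,
    getD_foldl_upd listt lt0 wrnk hps0 hnd0 j hj,
    if_congr (hmemiff (j : Int)) rfl rfl]
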